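-- pv_equiv track=rewrite | github.com/kintengg/VPROBE-monitoring-dashboard | backend/app/store.py | _bucket_minutes_for_zoom_level
-- ===== SOURCE A (Python) =====
-- from typing import Any, Optional, Union
--
-- MIN_DRILLDOWN_BUCKET_MINUTES = 5
--
-- def _next_zoom_bucket_minutes(current_bucket_minutes: int) -> Optional[int]:
--     if current_bucket_minutes > 15:
--         return 15
--     if current_bucket_minutes > MIN_DRILLDOWN_BUCKET_MINUTES:
--         return MIN_DRILLDOWN_BUCKET_MINUTES
--     return None
--
-- def _bucket_minutes_for_zoom_level(root_bucket_minutes: int, zoom_level: int) -> tuple[int, int]: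
--     current_bucket_minutes = root_bucket_minutes
--     actual_zoom_level = 0
--
--     while actual_zoom_level < max(zoom_level, 0):
--         next_bucket_minutes = _next_zoom_bucket_minutes(current_bucket_minutes)
--         if next_bucket_minutes is None:
--             break
--         current_bucket_minutes = next_bucket_minutes
--         actual_zoom_level += 1
--
--     return current_bucket_minutes, actual_zoom_level
-- ===== SOURCE B (Python) =====
-- MIN_DRILLDOWN_BUCKET_MINUTES = 5
--
-- def _bucket_minutes_for_zoom_level(root_bucket_minutes: int, zoom_level: int) -> tuple[int, int]:
--     # Closed-form case analysis: the zoom chain can only be root -> 15 -> 5.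
--     z = max(zoom_level, 0)
--     if z == 0:
--         return root_bucket_minutes, 0
--     if root_bucket_minutes > 15:
--         return (5, 2) if z >= 2 else (15, 1)
--     if root_bucket_minutes > MIN_DRILLDOWN_BUCKET_MINUTES:
--         return MIN_DRILLDOWN_BUCKET_MINUTES, 1
--     return root_bucket_minutes, 0
-- ===== Notes on version B (the rewrite author's own statement) =====
-- stated objective: simpler
-- what changed: Replaced the while-loop that repeatedly applies _next_zoom_bucket_minutes and counts steps with a direct constant-branch case analysis on root_bucket_minutes and the clamped zoom level, exploiting that the only possible chain is root -> 15 -> 5.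
import Mathlib
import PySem

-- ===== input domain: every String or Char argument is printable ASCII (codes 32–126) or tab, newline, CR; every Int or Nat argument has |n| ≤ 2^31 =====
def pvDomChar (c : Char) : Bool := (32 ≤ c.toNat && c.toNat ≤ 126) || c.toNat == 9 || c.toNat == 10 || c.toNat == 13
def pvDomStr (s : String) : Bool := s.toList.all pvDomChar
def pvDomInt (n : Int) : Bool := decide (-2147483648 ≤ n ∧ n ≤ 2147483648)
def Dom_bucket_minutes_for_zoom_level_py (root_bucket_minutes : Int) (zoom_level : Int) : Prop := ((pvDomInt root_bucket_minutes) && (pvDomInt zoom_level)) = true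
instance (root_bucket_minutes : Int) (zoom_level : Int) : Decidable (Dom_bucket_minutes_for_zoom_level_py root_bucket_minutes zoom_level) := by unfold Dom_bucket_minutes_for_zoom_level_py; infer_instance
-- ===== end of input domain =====

-- B replaces A's while-loop with a direct constant-branch case analysis (objective: simpler).

-- ===== PORT A =====
-- helper _next_zoom_bucket_minutes
def pvNextZoomBucketMinutes (current_bucket_minutes : Int) : Option Int :=
  if current_bucket_minutes > 15 then some 15
  else if current_bucket_minutes > 5 then some 5
  else none

-- the while-loop: runs while actual_zoom_level < max(zoom_level,0); since actual_zoom_level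
-- increases by 1 each iteration, the remaining iteration budget (max(zoom_level,0) - actual) is fuel
def pvLoopA (current actual : Int) (fuel : Nat) : Int × Int :=
  match fuel with
  | 0 => (current, actual)
  | Nat.succ n =>
    match pvNextZoomBucketMinutes current with
    | none => (current, actual)
    | some nb => pvLoopA nb (actual + 1) n

def bucket_minutes_for_zoom_level_py (root_bucket_minutes : Int) (zoom_level : Int) : Int × Int :=
  pvLoopA root_bucket_minutes 0 (max zoom_level 0).toNat

-- ===== PORT B =====
def bucket_minutes_for_zoom_level_py_alt (root_bucket_minutes : Int) (zoom_level : Int) : Int × Int :=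
  let z := max zoom_level 0
  if z = 0 then (root_bucket_minutes, 0)
  else if root_bucket_minutes > 15 then
    (if z ≥ 2 then (5, 2) else (15, 1))
  else if root_bucket_minutes > 5 then (5, 1)
  else (root_bucket_minutes, 0)

-- ===== PRECONDITION & SPEC =====
def Spec_bucket_minutes_for_zoom_level_py (root_bucket_minutes : Int) (zoom_level : Int) (out : Int × Int) : Prop := out = bucket_minutes_for_zoom_level_py_alt root_bucket_minutes zoom_level
instance (root_bucket_minutes : Int) (zoom_level : Int) (out : Int × Int) : Decidable (Spec_bucket_minutes_for_zoom_level_py root_bucket_minutes zoom_level out) := by unfold Spec_bucket_minutes_for_zoom_level_py; infer_instance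

-- ===== CLAIM (what is proved, stated in full; the proofs are below) =====
def Claim_equal_bucket_minutes_for_zoom_level_py : Prop := ∀ (root_bucket_minutes : Int) (zoom_level : Int), Dom_bucket_minutes_for_zoom_level_py root_bucket_minutes zoom_level → Spec_bucket_minutes_for_zoom_level_py root_bucket_minutes zoom_level (bucket_minutes_for_zoom_level_py root_bucket_minutes zoom_level)

-- ===== LEMMAS AND PROOFS =====

-- once the bucket is ≤ 5 the loop stops immediately, whatever fuel remains
theorem pvLoopA_stuck (current actual : Int) (fuel : Nat) (h : ¬ current > 15) (h5 : ¬ current > 5) :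
    pvLoopA current actual fuel = (current, actual) := by
  cases fuel with
  | zero => rfl
  | succ n => simp [pvLoopA, pvNextZoomBucketMinutes, h, h5]

theorem pvLoopA_closed (r : Int) (fuel : Nat) :
    pvLoopA r 0 fuel =
      (if fuel = 0 then (r, 0)
       else if r > 15 then (if fuel ≥ 2 then ((5 : Int), (2 : Int)) else (15, 1))
       else if r > 5 then (5, 1)
       else (r, 0)) := by
  match fuel with
  | 0 => rfl
  | 1 =>
    by_cases h15 : r > 15
    · simp [pvLoopA, pvNextZoomBucketMinutes, h15]
    · by_cases h5 : r > 5
      · simp [pvLoopA, pvNextZoomBucketMinutes, h15, h5]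
      · simp [pvLoopA, pvNextZoomBucketMinutes, h15, h5]
  | Nat.succ (Nat.succ n) =>
    by_cases h15 : r > 15
    · have : pvLoopA 5 2 n = (5, 2) := pvLoopA_stuck 5 2 n (by norm_num) (by norm_num)
      simp [pvLoopA, pvNextZoomBucketMinutes, h15, this]
    · by_cases h5 : r > 5
      · have : pvLoopA 5 1 (Nat.succ n) = (5, 1) := pvLoopA_stuck 5 1 _ (by norm_num) (by norm_num)
        simp [pvLoopA, pvNextZoomBucketMinutes, h15, h5, this]
      · simp [pvLoopA, pvNextZoomBucketMinutes, h15, h5]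

-- ===== VERDICT (by name: the statement is the Claim_ definition above) =====
theorem bucket_minutes_for_zoom_level_py_spec : Claim_equal_bucket_minutes_for_zoom_level_py := by
  intro r z _
  unfold Spec_bucket_minutes_for_zoom_level_py bucket_minutes_for_zoom_level_py
    bucket_minutes_for_zoom_level_py_alt
  rw [pvLoopA_closed]
  have h0 : ((max z 0).toNat = 0) ↔ (max z 0 = 0) := by omega
  have h2 : ((max z 0).toNat ≥ 2) ↔ (max z 0 ≥ 2) := by omega
  simp only [h0, h2]
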